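-- pv_equiv track=rewrite | github.com/KB-perByte/CodePedia | Gen2_0_PP/Homeworks/geeksForGeeks_ratMazeWithMultipleJumps.py | maze_solve
-- ===== SOURCE A (Python) =====
-- def maze_solve(i, j, n, sol, mat):
--     if i == n - 1 and j == n - 1:
--         sol[i][j] = 1
--         return True
--
--     if i >= 0 and i < n and j >= 0 and j < n and mat[i][j]>=1:
--         for step in range(1, mat[i][j] + 1):
--             if maze_solve(i, j + step, n, sol, mat):
--                 sol[i][j] = 1
--                 return True
--
--             if maze_solve(i + step, j, n, sol, mat):
--                 sol[i][j] = 1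
--                 return True
--
--         sol[i][j] = 0
--         return False
--     else:
--         return False
-- ===== SOURCE B (Python) =====
-- def maze_solve(i, j, n, sol, mat):
--     # Bottom-up DP over the whole grid instead of A's recursive DFS.
--     # Note: computes the return value only; it does not write into sol.
--     if not (0 <= i < n and 0 <= j < n):
--         return False
--     below = []  # rows r+1 .. n-1, each a list of n booleans
--     for r in range(n - 1, -1, -1):
--         row = []  # cells c+1 .. n-1 of row r (grows leftwards)
--         for c in range(n - 1, -1, -1):
--             if r == n - 1 and c == n - 1:
--                 v = True
--             else:
--                 m = mat[r][c]
--                 v = m >= 1 and (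
--                     any(row[s - 1] for s in range(1, min(m, n - 1 - c) + 1))
--                     or any(below[s - 1][c] for s in range(1, min(m, n - 1 - r) + 1))
--                 )
--             row = [v] + row
--         below = [row] + below
--     return below[i][j]
-- ===== Notes on version B (the rewrite author's own statement) =====
-- stated objective: alternative
-- what changed: Replaced A's recursive DFS (which re-explores cells and can revisit them exponentially often) by a single bottom-up dynamic program that fills an n x n reachability table right-to-left, bottom-to-top, capping each jump range at the grid edge, and answers by one table lookup; B computes the return value only and does not write into sol; Pre_ restricts to n >= 1 with full n x n sol/mat grids (plus the immediately-rejected out-of-bounds starts, where neither program indexes anything).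
-- outside the precondition, e.g. on maze_solve(1, 0, 2, [[0, 0], [0, 0]], [[1], [1, 1]]): A returns True, B raises IndexError; on maze_solve(-1, -1, 0, [[1]], [[1]]): A returns True, B returns False
import Mathlib
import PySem

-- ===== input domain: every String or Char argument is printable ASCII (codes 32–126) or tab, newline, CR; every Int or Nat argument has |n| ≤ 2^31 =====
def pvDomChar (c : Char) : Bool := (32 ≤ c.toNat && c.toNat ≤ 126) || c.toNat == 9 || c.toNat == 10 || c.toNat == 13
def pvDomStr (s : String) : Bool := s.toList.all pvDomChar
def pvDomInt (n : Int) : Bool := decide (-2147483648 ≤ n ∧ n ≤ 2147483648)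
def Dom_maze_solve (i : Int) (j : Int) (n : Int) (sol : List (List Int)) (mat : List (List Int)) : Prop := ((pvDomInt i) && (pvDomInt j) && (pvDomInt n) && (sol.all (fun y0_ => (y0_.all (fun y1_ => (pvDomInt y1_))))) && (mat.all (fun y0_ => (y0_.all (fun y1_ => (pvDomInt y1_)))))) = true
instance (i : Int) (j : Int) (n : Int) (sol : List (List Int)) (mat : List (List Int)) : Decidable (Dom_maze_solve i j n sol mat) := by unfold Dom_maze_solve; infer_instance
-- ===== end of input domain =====

-- B replaces A's recursive DFS by a bottom-up dynamic program over the whole grid (a different algorithm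
-- of similar measured cost); equivalence is about the RETURN value only: A writes into sol in place, B leaves sol unchanged.

-- ===== PORT A =====
-- Python A reads mat[i][j] only under the guard 0 <= i < n, 0 <= j < n; pyGetD is exact there under Pre_.
def maze_solve (i : Int) (j : Int) (n : Int) (sol : List (List Int)) (mat : List (List Int)) : Bool :=
  if i = n - 1 ∧ j = n - 1 then true
  else if h : 0 ≤ i ∧ i < n ∧ 0 ≤ j ∧ j < n ∧ 1 ≤ PySem.List.pyGetD (PySem.List.pyGetD mat i []) j 0 then
    (PySem.List.pyRange 1 (PySem.List.pyGetD (PySem.List.pyGetD mat i []) j 0 + 1) 1).attach.any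
      (fun st => maze_solve i (j + st.1) n sol mat || maze_solve (i + st.1) j n sol mat)
  else false
termination_by (2 * n - i - j).toNat
decreasing_by
  · have hm := PySem.List.mem_pyRange_one.mp st.2
    omega
  · have hm := PySem.List.mem_pyRange_one.mp st.2
    omega

-- ===== PORT B =====
-- one cell of the DP: right = cells c+1..n-1 of this row, below = rows r+1..n-1
def altCell (n r c : Int) (mat : List (List Int)) (right : List Bool) (below : List (List Bool)) : Bool :=
  if r = n - 1 ∧ c = n - 1 then true
  else
    let m := (mat.getD r.toNat []).getD c.toNat 0
    decide (1 ≤ m) &&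
      ((PySem.List.pyRange 1 (min m (n - 1 - c) + 1) 1).any (fun s => right.getD (s - 1).toNat false)
       || (PySem.List.pyRange 1 (min m (n - 1 - r) + 1) 1).any
            (fun s => ((below.getD (s - 1).toNat []).getD c.toNat false)))

-- the inner 'for c in range(n-1, -1, -1)' loop: k cells built, prepending; result = cells n-k..n-1
def altRow (n r : Int) (mat : List (List Int)) (below : List (List Bool)) : Nat → List Bool
  | 0 => []
  | Nat.succ k =>
      let rest := altRow n r mat below k
      altCell n r (n - (k + 1 : Nat)) mat rest below :: rest

-- the outer 'for r in range(n-1, -1, -1)' loop: k rows built, prepending; result = rows n-k..n-1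
def altRows (n : Int) (mat : List (List Int)) : Nat → List (List Bool)
  | 0 => []
  | Nat.succ k =>
      let rest := altRows n mat k
      altRow n (n - (k + 1 : Nat)) mat rest n.toNat :: rest

def maze_solve_alt (i : Int) (j : Int) (n : Int) (sol : List (List Int)) (mat : List (List Int)) : Bool :=
  if 0 ≤ i ∧ i < n ∧ 0 ≤ j ∧ j < n then
    (((altRows n mat n.toNat).getD i.toNat []).getD j.toNat false)
  else false

-- ===== PRECONDITION & SPEC =====
-- Pre_ admits every immediately-rejected start (out of bounds and not the goal: neither program indexes
-- anything there) and otherwise restricts to the natural domain — n >= 1 with sol and mat full n x n grids: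
-- outside it A raises IndexError (too-short sol/mat rows it visits), or returns via accidents its own code
-- never intends — a True through Python negative-index wraparound when n <= 0, or a value on a ragged mat
-- whose short row its DFS happens never to visit while B's whole-grid DP raises there.
def Pre_maze_solve (i : Int) (j : Int) (n : Int) (sol : List (List Int)) (mat : List (List Int)) : Prop :=
  (¬ (i = n - 1 ∧ j = n - 1) ∧ ¬ (0 ≤ i ∧ i < n ∧ 0 ≤ j ∧ j < n)) ∨
  (1 ≤ n ∧ mat.length = n.toNat ∧ (∀ row ∈ mat, row.length = n.toNat) ∧
   sol.length = n.toNat ∧ (∀ row ∈ sol, row.length = n.toNat))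
instance (i : Int) (j : Int) (n : Int) (sol : List (List Int)) (mat : List (List Int)) : Decidable (Pre_maze_solve i j n sol mat) := by unfold Pre_maze_solve; infer_instance

def pvWitness_maze_solve : Int × Int × Int × List (List Int) × List (List Int) :=
  (0, 0, 2, [[0, 0], [0, 0]], [[1, 1], [1, 1]])

def Spec_maze_solve (i : Int) (j : Int) (n : Int) (sol : List (List Int)) (mat : List (List Int)) (out : Bool) : Prop := out = maze_solve_alt i j n sol mat
instance (i : Int) (j : Int) (n : Int) (sol : List (List Int)) (mat : List (List Int)) (out : Bool) : Decidable (Spec_maze_solve i j n sol mat out) := by unfold Spec_maze_solve; infer_instance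

-- ===== CLAIM (what is proved, stated in full; the proofs are below) =====
def Claim_equal_maze_solve : Prop := ∀ (i : Int) (j : Int) (n : Int) (sol : List (List Int)) (mat : List (List Int)), Dom_maze_solve i j n sol mat → Pre_maze_solve i j n sol mat → Spec_maze_solve i j n sol mat (maze_solve i j n sol mat)

-- ===== LEMMAS AND PROOFS =====

-- entry t of a k-cell row suffix is the DP cell at column n-k+t, whose own right-context is the (k-t-1)-cell suffix
theorem altRow_getD (n r : Int) (mat : List (List Int)) (below : List (List Bool)) :
    ∀ (k t : Nat), t < k →
      (altRow n r mat below k).getD t false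
        = altCell n r (n - k + t) mat (altRow n r mat below (k - t - 1)) below := by
  intro k
  induction k with
  | zero => intro t ht; omega
  | succ k ih =>
    intro t ht
    cases t with
    | zero =>
      simp [altRow]
    | succ t =>
      have ht' : t < k := by omega
      have := ih t ht'
      simp only [altRow, List.getD_cons_succ, Nat.succ_sub_succ]
      rw [this]
      push_cast
      ring_nf

-- entry t of a k-row suffix is the DP row n-k+t, whose below-context is the (k-t-1)-row suffix
theorem altRows_getD (n : Int) (mat : List (List Int)) :
    ∀ (k t : Nat), t < k →
      (altRows n mat k).getD t []
        = altRow n (n - k + t) mat (altRows n mat (k - t - 1)) n.toNat := by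
  intro k
  induction k with
  | zero => intro t ht; omega
  | succ k ih =>
    intro t ht
    cases t with
    | zero =>
      simp [altRows]
    | succ t =>
      have ht' : t < k := by omega
      have := ih t ht'
      simp only [altRows, List.getD_cons_succ, Nat.succ_sub_succ]
      rw [this]
      push_cast
      ring_nf

-- the full-table lookup of cell (r,c), for in-bounds r,c
def Tcell (n : Int) (mat : List (List Int)) (r c : Int) : Bool :=
  ((altRows n mat n.toNat).getD r.toNat []).getD c.toNat false

theorem Tcell_eq_altCell (n : Int) (mat : List (List Int)) (r c : Int)
    (hn : 1 ≤ n) (hr0 : 0 ≤ r) (hrn : r < n) (hc0 : 0 ≤ c) (hcn : c < n) :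
    Tcell n mat r c
      = altCell n r c mat
          (altRow n r mat (altRows n mat (n.toNat - r.toNat - 1)) (n.toNat - c.toNat - 1))
          (altRows n mat (n.toNat - r.toNat - 1)) := by
  unfold Tcell
  rw [altRows_getD n mat n.toNat r.toNat (by omega)]
  have h1 : n - (n.toNat : Int) + (r.toNat : Int) = r := by omega
  rw [h1]
  rw [altRow_getD n r mat _ n.toNat c.toNat (by omega)]
  have h2 : n - (n.toNat : Int) + (c.toNat : Int) = c := by omega
  rw [h2]

-- the DP recurrence satisfied by the table
theorem Tcell_rec (n : Int) (mat : List (List Int)) (r c : Int)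
    (hn : 1 ≤ n) (hr0 : 0 ≤ r) (hrn : r < n) (hc0 : 0 ≤ c) (hcn : c < n) :
    Tcell n mat r c
      = if r = n - 1 ∧ c = n - 1 then true
        else
          (decide (1 ≤ (mat.getD r.toNat []).getD c.toNat 0)) &&
            ((PySem.List.pyRange 1 (min ((mat.getD r.toNat []).getD c.toNat 0) (n - 1 - c) + 1) 1).any
                (fun s => Tcell n mat r (c + s))
             || (PySem.List.pyRange 1 (min ((mat.getD r.toNat []).getD c.toNat 0) (n - 1 - r) + 1) 1).any
                (fun s => Tcell n mat (r + s) c)) := by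
  rw [Tcell_eq_altCell n mat r c hn hr0 hrn hc0 hcn]
  unfold altCell
  split
  · rfl
  · simp only []
    congr 1
    congr 1
    · -- right moves
      apply PySem.List.any_congr_mem
      intro s hs
      have hsb := PySem.List.mem_pyRange_one.mp hs
      have hs1 : 1 ≤ s := hsb.1
      have hs2 : s ≤ min ((mat.getD r.toNat []).getD c.toNat 0) (n - 1 - c) := by omega
      have hscn : c + s < n := by omega
      rw [altRow_getD n r mat _ (n.toNat - c.toNat - 1) (s - 1).toNat (by omega)]
      rw [Tcell_eq_altCell n mat r (c + s) hn hr0 hrn (by omega) hscn]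
      have h1 : n - ((n.toNat - c.toNat - 1 : Nat) : Int) + ((s - 1).toNat : Int) = c + s := by omega
      rw [h1]
      have h2 : (n.toNat - c.toNat - 1) - (s - 1).toNat - 1 = n.toNat - (c + s).toNat - 1 := by omega
      rw [h2]
    · -- down moves
      apply PySem.List.any_congr_mem
      intro s hs
      have hsb := PySem.List.mem_pyRange_one.mp hs
      have hs1 : 1 ≤ s := hsb.1
      have hs2 : s ≤ min ((mat.getD r.toNat []).getD c.toNat 0) (n - 1 - r) := by omega
      have hsrn : r + s < n := by omega
      rw [altRows_getD n mat (n.toNat - r.toNat - 1) (s - 1).toNat (by omega)]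
      have h1 : n - ((n.toNat - r.toNat - 1 : Nat) : Int) + ((s - 1).toNat : Int) = r + s := by omega
      rw [h1]
      rw [altRow_getD n (r + s) mat _ n.toNat c.toNat (by omega)]
      have h2 : n - (n.toNat : Int) + (c.toNat : Int) = c := by omega
      rw [h2]
      rw [Tcell_eq_altCell n mat (r + s) c hn (by omega) hsrn hc0 hcn]
      have h3 : (n.toNat - r.toNat - 1) - (s - 1).toNat - 1 = n.toNat - (r + s).toNat - 1 := by omega
      rw [h3]

-- in-bounds nonnegative Python indexing is plain getD
theorem pyGetD_mat (mat : List (List Int)) (r c : Int) (hr : 0 ≤ r) (hc : 0 ≤ c) :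
    PySem.List.pyGetD (PySem.List.pyGetD mat r []) c 0 = (mat.getD r.toNat []).getD c.toNat 0 := by
  rw [PySem.List.pyGetD_of_nonneg mat [] hr, PySem.List.pyGetD_of_nonneg _ 0 hc]

-- main agreement: A's DFS value equals the DP table lookup, by induction on 2n - r - c
theorem main_lemma (n : Int) (sol mat : List (List Int)) (hn : 1 ≤ n) :
    ∀ (K : Nat) (r c : Int), (2 * n - r - c).toNat ≤ K →
      maze_solve r c n sol mat
        = (if 0 ≤ r ∧ r < n ∧ 0 ≤ c ∧ c < n then Tcell n mat r c else false) := by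
  intro K
  induction K with
  | zero =>
    intro r c hK
    rw [maze_solve]
    have hout : ¬ (r < n ∧ c < n) := by omega
    have hgoal : ¬ (r = n - 1 ∧ c = n - 1) := by omega
    rw [if_neg hgoal, dif_neg (by omega)]
    split
    · omega
    · rfl
  | succ K ih =>
    intro r c hK
    rw [maze_solve]
    by_cases hgoal : r = n - 1 ∧ c = n - 1
    · rw [if_pos hgoal, if_pos (by omega)]
      rw [Tcell_rec n mat r c hn (by omega) (by omega) (by omega) (by omega)]
      rw [if_pos hgoal]
    · rw [if_neg hgoal]
      by_cases hg : 0 ≤ r ∧ r < n ∧ 0 ≤ c ∧ c < n ∧ 1 ≤ PySem.List.pyGetD (PySem.List.pyGetD mat r []) c 0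
      · rw [dif_pos hg]
        obtain ⟨hr0, hrn, hc0, hcn, hm1⟩ := hg
        rw [if_pos ⟨hr0, hrn, hc0, hcn⟩]
        rw [Tcell_rec n mat r c hn hr0 hrn hc0 hcn, if_neg hgoal]
        rw [pyGetD_mat mat r c hr0 hc0] at hm1 ⊢
        set m := (mat.getD r.toNat []).getD c.toNat 0 with hmdef
        rw [decide_eq_true hm1, Bool.true_and]
        apply Bool.eq_iff_iff.mpr
        simp only [List.any_eq_true, List.mem_attach, true_and, Subtype.exists,
          PySem.List.mem_pyRange_one, Bool.or_eq_true]
        constructor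
        · rintro ⟨s, ⟨hs1, hs2⟩, hor⟩
          rcases hor with hR | hD
          · rw [ih r (c + s) (by omega)] at hR
            by_cases hb : 0 ≤ r ∧ r < n ∧ 0 ≤ c + s ∧ c + s < n
            · rw [if_pos hb] at hR
              exact Or.inl ⟨s, ⟨hs1, by omega⟩, hR⟩
            · rw [if_neg hb] at hR; exact absurd hR (by simp)
          · rw [ih (r + s) c (by omega)] at hD
            by_cases hb : 0 ≤ r + s ∧ r + s < n ∧ 0 ≤ c ∧ c < n
            · rw [if_pos hb] at hD
              exact Or.inr ⟨s, ⟨hs1, by omega⟩, hD⟩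
            · rw [if_neg hb] at hD; exact absurd hD (by simp)
        · rintro (⟨s, ⟨hs1, hs2⟩, hT⟩ | ⟨s, ⟨hs1, hs2⟩, hT⟩)
          · refine ⟨s, ⟨hs1, by omega⟩, Or.inl ?_⟩
            rw [ih r (c + s) (by omega), if_pos (by omega)]
            exact hT
          · refine ⟨s, ⟨hs1, by omega⟩, Or.inr ?_⟩
            rw [ih (r + s) c (by omega), if_pos (by omega)]
            exact hT
      · rw [dif_neg hg]
        by_cases hb : 0 ≤ r ∧ r < n ∧ 0 ≤ c ∧ c < n
        · rw [if_pos hb]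
          obtain ⟨hr0, hrn, hc0, hcn⟩ := hb
          have hm : ¬ 1 ≤ PySem.List.pyGetD (PySem.List.pyGetD mat r []) c 0 := by
            intro h; exact hg ⟨hr0, hrn, hc0, hcn, h⟩
          rw [pyGetD_mat mat r c hr0 hc0] at hm
          rw [Tcell_rec n mat r c hn hr0 hrn hc0 hcn, if_neg hgoal]
          rw [decide_eq_false hm, Bool.false_and]
        · rw [if_neg hb]

-- ===== VERDICT (by name: the statement is the Claim_ definition above) =====
theorem maze_solve_spec : Claim_equal_maze_solve := by
  intro i j n sol mat _hdom hpre
  unfold Spec_maze_solve maze_solve_alt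
  rcases hpre with ⟨hgoal, hbnd⟩ | hfull
  · rw [if_neg hbnd, maze_solve, if_neg hgoal,
      dif_neg (fun hg => hbnd ⟨hg.1, hg.2.1, hg.2.2.1, hg.2.2.2.1⟩)]
  · rw [main_lemma n sol mat hfull.1 (2 * n - i - j).toNat i j le_rfl]
    rfl
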